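-- pv_equiv track=rewrite | github.com/Uramix2/DNS-solver | scripts/parser_txt.py | TLD
-- ===== SOURCE A (Python) =====
-- def parent_domain(domain):
--     """
--     Retourne le domaine parent d'un domaine donné.
--     Exemple : pour "sub.example.com", retourne "example.com".
--     """
--     parts = domain.split('.')
--     if len(parts) < 2:
--         return None
--     return '.'.join(parts[-2:])
--
-- def TLD(domain):
--     """
--     Permet de lister touts les TLD d'un domaine donné
--     """
--     domain_parts = domain.split('.')
--     tlds = []
--     for i in range(1, len(domain_parts) - 1):
--         tld = '.'.join(domain_parts[i:])
--         if parent_domain(tld) != tld: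
--             tlds.append(tld)
--     return tlds
-- ===== SOURCE B (Python) =====
-- def TLD(domain):
--     """
--     Permet de lister touts les TLD d'un domaine donné
--     """
--     labels = domain.split('.')
--     out = []
--     suffix = labels[-1]
--     count = 1
--     for lab in reversed(labels[1:-1]):
--         suffix = lab + '.' + suffix
--         count += 1
--         if count >= 3:
--             out.append(suffix)
--     out.reverse()
--     return out
-- ===== Notes on version B (the rewrite author's own statement) =====
-- stated objective: simpler
-- what changed: Replaces the per-index slice+join+re-split (parent_domain) loop by a single right-to-left pass that grows one running suffix string and counts labels, then reverses the collected list; the parent_domain helper disappears.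
import Mathlib
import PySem

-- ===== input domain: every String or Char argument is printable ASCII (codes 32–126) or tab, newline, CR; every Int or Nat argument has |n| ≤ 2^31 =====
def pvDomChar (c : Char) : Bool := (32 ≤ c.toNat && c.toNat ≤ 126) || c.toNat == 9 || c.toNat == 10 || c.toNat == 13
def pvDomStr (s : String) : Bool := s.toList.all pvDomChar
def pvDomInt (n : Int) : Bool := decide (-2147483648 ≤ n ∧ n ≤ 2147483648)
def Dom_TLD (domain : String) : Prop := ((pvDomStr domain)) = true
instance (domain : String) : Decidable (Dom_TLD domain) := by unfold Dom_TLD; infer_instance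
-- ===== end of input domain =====

-- B replaces the per-suffix slice+join+re-split (parent_domain) loop by one right-to-left
-- pass growing a running suffix string with a label count; objective: simpler.


-- ===== PORT A =====
-- parent_domain: split on '.', None if fewer than 2 parts, else join of the last two
def parentDomain (d : String) : Option String :=
  let parts := (PySem.Chars.splitOn d.toList ['.']).map String.ofList
  if parts.length < 2 then none
  else some (PySem.Str.join "." (PySem.List.slice parts (some (-2)) none))

def TLD (domain : String) : List String :=
  let dp := (PySem.Chars.splitOn domain.toList ['.']).map String.ofList
  (PySem.List.pyRange 1 ((dp.length : Int) - 1) 1).foldl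
    (fun tlds i =>
      let tld := PySem.Str.join "." (PySem.List.slice dp (some i) none)
      if parentDomain tld ≠ some tld then tlds ++ [tld] else tlds) []

-- ===== PORT B =====
def TLD_alt (domain : String) : List String :=
  let labels := (PySem.Chars.splitOn domain.toList ['.']).map String.ofList
  match labels.getLast? with
  | none => []  -- unreachable totality guard: Python's split always returns a nonempty list
  | some lastLabel =>
    let mid := (PySem.List.slice labels (some 1) (some (-1))).reverse
    let st := mid.foldl
      (fun (st : String × Int × List String) lab =>
        let suffix := PySem.Str.join "." [lab, st.1]   -- lab + '.' + suffix
        let count := st.2.1 + 1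
        (suffix, count, if 3 ≤ count then st.2.2 ++ [suffix] else st.2.2))
      (lastLabel, 1, [])
    st.2.2.reverse

-- ===== PRECONDITION & SPEC =====
def Spec_TLD (domain : String) (out : List String) : Prop := out = TLD_alt domain
instance (domain : String) (out : List String) : Decidable (Spec_TLD domain out) := by unfold Spec_TLD; infer_instance

-- ===== CLAIM (what is proved, stated in full; the proofs are below) =====
def Claim_equal_TLD : Prop := ∀ (domain : String), Dom_TLD domain → Spec_TLD domain (TLD domain)

-- ===== LEMMAS AND PROOFS =====

-- clean structural model of CPython's str.split('.') (proof helper)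
def sp : List Char → List Char → List (List Char)
  | [], cur => [cur.reverse]
  | c :: rest, cur => if c = '.' then cur.reverse :: sp rest [] else sp rest (c :: cur)

theorem sp_dot (rest cur : List Char) : sp ('.' :: rest) cur = cur.reverse :: sp rest [] := rfl

theorem go_eq_sp (fuel : Nat) (l cur : List Char) (acc : List (List Char))
    (h : l.length < fuel) :
    PySem.Chars.splitOn.go ['.'] fuel l cur acc = acc.reverse ++ sp l cur := by
  induction fuel generalizing l cur acc with
  | zero => omega
  | succ fuel ih =>
    rw [PySem.Chars.splitOn.go.eq_def]
    split
    · omega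
    · simp [sp]
    · rename_i cur' acc' a1 a2 a3 a4 fuel' c rest heq
      obtain rfl : fuel' = fuel := by omega
      by_cases hc : c = '.'
      · subst hc
        rw [if_pos (by simp [List.isPrefixOf])]
        rw [ih _ _ _ (by simp at h ⊢; omega)]
        rw [sp_dot]; simp
      · rw [if_neg (by simp [List.isPrefixOf]; exact fun h' => hc h'.symm)]
        rw [ih _ _ _ (by simp at h; omega)]
        simp [sp, hc]

theorem splitOn_eq_sp (cs : List Char) :
    PySem.Chars.splitOn cs ['.'] = sp cs [] := by
  rw [PySem.Chars.splitOn, go_eq_sp _ _ _ _ (by omega)]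
  simp

theorem sp_ne_nil (l cur : List Char) : sp l cur ≠ [] := by
  induction l generalizing cur with
  | nil => simp [sp]
  | cons c rest ih =>
    by_cases hc : c = '.' <;> simp [sp, hc, ih]

theorem sp_dotfree (l cur : List Char) (hcur : ('.' : Char) ∉ cur) :
    ∀ p ∈ sp l cur, ('.' : Char) ∉ p := by
  induction l generalizing cur with
  | nil => simpa [sp] using hcur
  | cons c rest ih =>
    by_cases hc : c = '.'
    · subst hc
      rw [sp_dot]
      intro p hp
      rcases List.mem_cons.mp hp with h | h
      · subst h; simpa using hcur
      · exact ih [] (by simp) p h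
    · simp only [sp, if_neg hc]
      exact ih (c :: cur) (by simp only [List.mem_cons, not_or]; exact ⟨fun h => hc h.symm, hcur⟩)

theorem join_sp (l cur : List Char) :
    PySem.Chars.join ['.'] (sp l cur) = cur.reverse ++ l := by
  induction l generalizing cur with
  | nil => simp [sp, PySem.Chars.join_singleton]
  | cons c rest ih =>
    by_cases hc : c = '.'
    · subst hc
      rw [sp_dot]
      obtain ⟨q, qs, hq⟩ : ∃ q qs, sp rest [] = q :: qs := by
        cases h : sp rest [] with
        | nil => exact absurd h (sp_ne_nil _ _)
        | cons q qs => exact ⟨q, qs, rfl⟩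
      rw [hq, PySem.Chars.join_cons_cons, ← hq, ih]
      simp
    · simp only [sp, if_neg hc]
      rw [ih]
      simp

theorem dot_split_inj (p : List Char) : ∀ (q u v : List Char),
    ('.' : Char) ∉ p → ('.' : Char) ∉ q →
    p ++ '.' :: u = q ++ '.' :: v → p = q ∧ u = v := by
  induction p with
  | nil =>
    intro q u v _ hq h
    cases q with
    | nil => simpa using h
    | cons b q' =>
      exfalso
      have : b = '.' := by
        have h1 : ('.' : Char) = b := by simpa using congrArg (·.head?) h
        exact h1.symm
      exact hq (by simp [this])
  | cons a p' ih =>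
    intro q u v hp hq h
    cases q with
    | nil =>
      exfalso
      have : a = '.' := by simpa using congrArg (·.head?) h
      exact hp (by simp [this])
    | cons b q' =>
      have hab : a = b := by simpa using congrArg (·.head?) h
      have ht : p' ++ '.' :: u = q' ++ '.' :: v := by simpa using congrArg (·.tail) h
      have := ih q' u v (fun hm => hp (by simp [hm])) (fun hm => hq (by simp [hm])) ht
      exact ⟨by simp [hab, this.1], this.2⟩

theorem joinC_inj (ps : List (List Char)) : ∀ (qs : List (List Char)),
    ps ≠ [] → qs ≠ [] →
    (∀ p ∈ ps, ('.' : Char) ∉ p) → (∀ q ∈ qs, ('.' : Char) ∉ q) →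
    PySem.Chars.join ['.'] ps = PySem.Chars.join ['.'] qs → ps = qs := by
  induction ps with
  | nil => intro qs h; exact absurd rfl h
  | cons p ps' ih =>
    intro qs _ hqs hdp hdq h
    cases qs with
    | nil => exact absurd rfl hqs
    | cons q qs' =>
      cases ps' with
      | nil =>
        cases qs' with
        | nil =>
          simp only [PySem.Chars.join_singleton] at h
          simp [h]
        | cons q2 qs'' =>
          exfalso
          rw [PySem.Chars.join_singleton, PySem.Chars.join_cons_cons] at h
          have : ('.' : Char) ∈ p := by rw [h]; simp
          exact hdp p (by simp) this
      | cons p2 ps'' =>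
        cases qs' with
        | nil =>
          exfalso
          rw [PySem.Chars.join_singleton, PySem.Chars.join_cons_cons] at h
          have : ('.' : Char) ∈ q := by rw [← h]; simp
          exact hdq q (by simp) this
        | cons q2 qs'' =>
          rw [PySem.Chars.join_cons_cons, PySem.Chars.join_cons_cons] at h
          have h' : p ++ '.' :: PySem.Chars.join ['.'] (p2 :: ps'') =
              q ++ '.' :: PySem.Chars.join ['.'] (q2 :: qs'') := by simpa using h
          have hpq := dot_split_inj p q _ _ (hdp p (by simp)) (hdq q (by simp)) h'
          have := ih (q2 :: qs'') (by simp) (by simp)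
            (fun x hx => hdp x (by simp [hx])) (fun x hx => hdq x (by simp [hx])) hpq.2
          simp [hpq.1, this]

theorem sp_joinC (ps : List (List Char)) (hne : ps ≠ [])
    (hdf : ∀ p ∈ ps, ('.' : Char) ∉ p) :
    sp (PySem.Chars.join ['.'] ps) [] = ps := by
  apply joinC_inj _ _ (sp_ne_nil _ _) hne (sp_dotfree _ _ (by simp)) hdf
  rw [join_sp]; simp

-- String-level wrappers
theorem toList_joinS (ps : List String) :
    (PySem.Str.join "." ps).toList = PySem.Chars.join ['.'] (ps.map String.toList) := by
  rw [PySem.Str.toList_join]; rfl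

theorem strToListInj {a b : String} (h : a.toList = b.toList) : a = b := by
  have := congrArg String.ofList h
  simpa [String.ofList_toList] using this

theorem joinS_inj (ps qs : List String) (hp : ps ≠ []) (hq : qs ≠ [])
    (hdp : ∀ p ∈ ps, ('.' : Char) ∉ p.toList) (hdq : ∀ q ∈ qs, ('.' : Char) ∉ q.toList) :
    PySem.Str.join "." ps = PySem.Str.join "." qs ↔ ps = qs := by
  constructor
  · intro h
    have hc : PySem.Chars.join ['.'] (ps.map String.toList) =
        PySem.Chars.join ['.'] (qs.map String.toList) := by
      rw [← toList_joinS, ← toList_joinS, h]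
    have := joinC_inj (ps.map String.toList) (qs.map String.toList)
      (by simpa using hp) (by simpa using hq)
      (by intro p hp'; obtain ⟨x, hx, rfl⟩ := List.mem_map.mp hp'; exact hdp x hx)
      (by intro p hp'; obtain ⟨x, hx, rfl⟩ := List.mem_map.mp hp'; exact hdq x hx) hc
    have hinj : Function.Injective String.toList := by
      intro a b hab
      have := congrArg String.ofList hab
      simpa [String.ofList_toList] using this
    exact List.map_injective_iff.mpr hinj this
  · intro h; rw [h]

theorem splitS_of_joinS (ps : List String) (hne : ps ≠ [])
    (hdf : ∀ p ∈ ps, ('.' : Char) ∉ p.toList) :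
    (PySem.Chars.splitOn (PySem.Str.join "." ps).toList ['.']).map String.ofList = ps := by
  rw [toList_joinS, splitOn_eq_sp, sp_joinC _ (by simpa using hne)
    (by intro p hp'; obtain ⟨x, hx, rfl⟩ := List.mem_map.mp hp'; exact hdf x hx)]
  rw [List.map_map]
  have hall : ∀ x ∈ ps, (String.ofList ∘ String.toList) x = id x :=
    fun x _ => by exact String.ofList_toList
  rw [List.map_congr_left hall, List.map_id]

theorem joinS_two (a : String) (x : String) (xs : List String) :
    PySem.Str.join "." [a, PySem.Str.join "." (x :: xs)] = PySem.Str.join "." (a :: x :: xs) := by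
  apply strToListInj
  rw [toList_joinS, toList_joinS]
  simp only [List.map_cons, List.map_nil]
  rw [toList_joinS, List.map_cons, PySem.Chars.join_cons_cons, PySem.Chars.join_singleton,
    PySem.Chars.join_cons_cons]

theorem parent_of_joinS (ps : List String) (h2 : 2 ≤ ps.length)
    (hdf : ∀ p ∈ ps, ('.' : Char) ∉ p.toList) :
    parentDomain (PySem.Str.join "." ps) =
      some (PySem.Str.join "." (ps.drop (ps.length - 2))) := by
  unfold parentDomain
  rw [splitS_of_joinS ps (by intro h; subst h; simp at h2) hdf]
  rw [if_neg (by omega)]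
  rw [PySem.List.slice_from_neg_ofNat ps 2 (by omega)]

-- longest-first list of the ≥3-label suffixes of pre ++ suffix that use a proper tail of pre
def tls : List String → List String → List String
  | [], _ => []
  | lab :: rest, suffix =>
    (if 3 ≤ (lab :: rest ++ suffix).length then [PySem.Str.join "." (lab :: rest ++ suffix)] else [])
      ++ tls rest suffix

theorem foldB (pre : List String) : ∀ (suffix out : List String), suffix ≠ [] →
    pre.reverse.foldl
      (fun (st : String × Int × List String) lab =>
        let s := PySem.Str.join "." [lab, st.1]
        let c := st.2.1 + 1
        (s, c, if 3 ≤ c then st.2.2 ++ [s] else st.2.2))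
      (PySem.Str.join "." suffix, (suffix.length : Int), out)
    = (PySem.Str.join "." (pre ++ suffix), ((pre ++ suffix).length : Int),
       out ++ (tls pre suffix).reverse) := by
  induction pre with
  | nil => intro suffix out _; simp [tls]
  | cons lab rest ih =>
    intro suffix out hs
    rw [List.reverse_cons, List.foldl_append, ih suffix out hs]
    obtain ⟨x, xs, rfl⟩ : ∃ x xs, suffix = x :: xs := by
      cases suffix with
      | nil => exact absurd rfl hs
      | cons x xs => exact ⟨x, xs, rfl⟩
    simp only [List.foldl_cons, List.foldl_nil]
    have hjoin : PySem.Str.join "." [lab, PySem.Str.join "." (rest ++ x :: xs)] =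
        PySem.Str.join "." (lab :: rest ++ x :: xs) := by
      cases rest with
      | nil => simpa using joinS_two lab x xs
      | cons r rs => simpa using joinS_two lab r (rs ++ x :: xs)
    have hcnt : ((rest ++ x :: xs).length : Int) + 1 = ((lab :: rest ++ x :: xs).length : Int) := by
      simp only [List.length_cons, List.length_append]; push_cast; ring
    simp only [hjoin, hcnt, tls]
    by_cases h3 : 3 ≤ (lab :: rest ++ x :: xs).length
    · rw [if_pos (by exact_mod_cast h3), if_pos h3]
      simp
    · rw [if_neg (by exact_mod_cast h3), if_neg h3]
      simp

theorem foldA (dp : List String) (last : String)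
    (hdf : ∀ p ∈ dp, ('.' : Char) ∉ p.toList) :
    ∀ (pre : List String) (k : Nat) (acc : List String),
    dp.drop k = pre ++ [last] →
    (PySem.List.pyRange (k : Int) ((dp.length : Int) - 1) 1).foldl
      (fun tlds i =>
        let tld := PySem.Str.join "." (PySem.List.slice dp (some i) none)
        if parentDomain tld ≠ some tld then tlds ++ [tld] else tlds) acc
    = acc ++ tls pre [last] := by
  intro pre
  induction pre with
  | nil =>
    intro k acc hk
    have hlen : dp.length - k = 1 := by
      have := congrArg List.length hk; simpa using this
    have hkd : k < dp.length := by omega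
    rw [PySem.List.pyRange_one_eq_nil (by omega)]
    simp [tls]
  | cons lab rest ih =>
    intro k acc hk
    have hlen : dp.length - k = rest.length + 2 := by
      have := congrArg List.length hk; simp at this; omega
    have hkd : k + rest.length + 2 = dp.length := by omega
    rw [PySem.List.pyRange_one_cons (by omega)]
    rw [List.foldl_cons]
    have hslice : PySem.List.slice dp (some (k : Int)) none = dp.drop k := by
      rw [PySem.List.slice_from dp (by omega : (0:Int) ≤ (k : Int))]; simp
    have hdrop1 : dp.drop (k + 1) = rest ++ [last] := by
      have : dp.drop (k + 1) = (dp.drop k).drop 1 := by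
        rw [List.drop_drop]
      rw [this, hk]; simp
    have hdfk : ∀ p ∈ dp.drop k, ('.' : Char) ∉ p.toList :=
      fun p hp => hdf p (List.mem_of_mem_drop hp)
    have hparent : parentDomain (PySem.Str.join "." (dp.drop k)) =
        some (PySem.Str.join "." ((dp.drop k).drop ((dp.drop k).length - 2))) := by
      apply parent_of_joinS _ _ hdfk
      rw [hk]; simp
    simp only [hslice]
    by_cases h3 : 3 ≤ (lab :: rest ++ [last]).length
    · -- suffix has ≥ 3 labels: drop of last two differs from the whole list
      have hne : parentDomain (PySem.Str.join "." (dp.drop k)) ≠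
          some (PySem.Str.join "." (dp.drop k)) := by
        rw [hparent]
        intro hcontra
        have heq := Option.some.inj hcontra
        have hlists := (joinS_inj _ _ (by rw [hk]; simp [List.drop_eq_nil_iff])
          (by rw [hk]; simp) (fun p hp => hdfk p (List.mem_of_mem_drop hp)) hdfk).mp heq
        have := congrArg List.length hlists
        rw [hk] at this
        simp at this h3
        omega
      rw [if_pos hne]
      rw [show ((k:Int) + 1) = (((k+1 : Nat)) : Int) by omega]
      rw [ih (k + 1) _ (by exact hdrop1)]
      rw [hk]
      simp only [tls, if_pos h3]
      simp
    · -- exactly 2 labels: parent equals the suffix itself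
      have hlen2 : (dp.drop k).length = 2 := by
        rw [hk]; simp at h3 ⊢; omega
      have heq : parentDomain (PySem.Str.join "." (dp.drop k)) =
          some (PySem.Str.join "." (dp.drop k)) := by
        rw [hparent, hlen2]; simp
      rw [if_neg (by simp [heq])]
      rw [show ((k:Int) + 1) = (((k+1 : Nat)) : Int) by omega]
      rw [ih (k + 1) _ (by exact hdrop1)]
      simp only [tls, if_neg h3]
      simp

theorem slice_one_negone (xs : List String) :
    PySem.List.slice xs (some 1) (some (-1)) = xs.tail.dropLast := by
  cases xs with
  | nil => rfl
  | cons x rest =>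
    have ha : PySem.List.clampIdx (x :: rest).length 1 = 1 := by
      simp only [PySem.List.clampIdx, List.length_cons]
      split_ifs <;> omega
    have hb : PySem.List.clampIdx (x :: rest).length (-1) = rest.length := by
      simp only [PySem.List.clampIdx, List.length_cons]
      split_ifs <;> omega
    simp only [PySem.List.slice, ha, hb]
    rw [List.dropLast_eq_take]
    simp

-- ===== VERDICT (by name: the statement is the Claim_ definition above) =====
theorem TLD_spec : Claim_equal_TLD := by
  intro domain _
  unfold Spec_TLD TLD TLD_alt
  dsimp only
  set P := PySem.Chars.splitOn domain.toList ['.'] with hP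
  have hPsp : P = sp domain.toList [] := splitOn_eq_sp _
  set dp := P.map String.ofList with hdp
  have hdf : ∀ p ∈ dp, ('.' : Char) ∉ p.toList := by
    intro p hp
    obtain ⟨x, hx, rfl⟩ := List.mem_map.mp hp
    rw [String.toList_ofList]
    exact sp_dotfree _ _ (by simp) x (hPsp ▸ hx)
  have hdpne : dp ≠ [] := by
    simp only [hdp, hPsp, ne_eq, List.map_eq_nil_iff]
    exact sp_ne_nil _ _
  obtain ⟨init, last, hsplit⟩ : ∃ init last, dp = init ++ [last] := by
    cases h : dp.getLast? with
    | none => exact absurd (List.getLast?_eq_none_iff.mp h) hdpne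
    | some l => exact ⟨dp.dropLast, l, (List.dropLast_append_getLast? l h).symm⟩
  have hlast : dp.getLast? = some last := by rw [hsplit]; simp
  rw [hlast]
  simp only [slice_one_negone]
  cases init with
  | nil =>
    -- single label: both sides are []
    rw [hsplit]
    rw [PySem.List.pyRange_one_eq_nil (by simp)]
    simp
  | cons d0 mid =>
    have htail : dp.tail.dropLast = mid := by rw [hsplit]; simp
    have hdrop1 : dp.drop 1 = mid ++ [last] := by rw [hsplit]; simp
    rw [htail]
    have hB := foldB mid [last] [] (by simp)
    have hjs : PySem.Str.join "." [last] = last := by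
      apply strToListInj
      rw [toList_joinS]; simp [PySem.Chars.join_singleton]
    rw [hjs] at hB
    rw [show (([last].length : Nat) : Int) = 1 by simp] at hB
    rw [hB]
    simp only [List.reverse_reverse, List.nil_append]
    have hA := foldA dp last hdf mid 1 [] (by simpa using hdrop1)
    simpa using hA
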